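-- pv_equiv track=rewrite | github.com/nooka23/my-stock-scheduler | scripts/financials_account_map.py | select_account_row_by_priority
-- ===== SOURCE A (Python) =====
-- def normalize_account_id(value: str | None) -> str:
--     return (value or "").strip().upper()
--
-- def row_matches_account_id(row: dict[str, object], account_id: str) -> bool:
--     return normalize_account_id(str(row.get("account_id") or "")) == normalize_account_id(account_id)
--
-- def select_account_row_by_priority(
--     rows: list[dict[str, object]],
--     account_ids: list[str],
-- ) -> tuple[dict[str, object] | None, str | None, int | None]:
--     for priority_index, account_id in enumerate(account_ids, start=1):
--         normalized_account_id = normalize_account_id(account_id)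
--         if not normalized_account_id:
--             continue
--
--         for row in rows:
--             if row_matches_account_id(row, normalized_account_id):
--                 return row, normalized_account_id, priority_index
--
--     return None, None, None
-- ===== SOURCE B (Python) =====
-- def normalize_account_id(value):
--     return (value or "").strip().upper()
--
--
-- def select_account_row_by_priority(rows, account_ids):
--     # Build once: normalized id -> 1-based priority (first occurrence wins).
--     table = {}
--     for priority, account_id in enumerate(account_ids, start=1):
--         normalized = normalize_account_id(account_id)
--         if normalized and normalized not in table:
--             table[normalized] = priority
--
--     # Single argmin pass over rows; strict < keeps the earliest row on ties.
--     best_row, best_id, best_priority = None, None, None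
--     for row in rows:
--         normalized = normalize_account_id(str(row.get("account_id") or ""))
--         priority = table.get(normalized)
--         if priority is not None and (best_priority is None or priority < best_priority):
--             best_row, best_id, best_priority = row, normalized, priority
--     return best_row, best_id, best_priority
-- ===== Notes on version B (the rewrite author's own statement) =====
-- stated objective: faster
-- what changed: Replaced A's priority-outer/rows-inner nested scan with an early return by a one-time dict from normalized account id to its first 1-based priority followed by a single argmin pass over rows (strict < so the earliest row wins ties).
import Mathlib
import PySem

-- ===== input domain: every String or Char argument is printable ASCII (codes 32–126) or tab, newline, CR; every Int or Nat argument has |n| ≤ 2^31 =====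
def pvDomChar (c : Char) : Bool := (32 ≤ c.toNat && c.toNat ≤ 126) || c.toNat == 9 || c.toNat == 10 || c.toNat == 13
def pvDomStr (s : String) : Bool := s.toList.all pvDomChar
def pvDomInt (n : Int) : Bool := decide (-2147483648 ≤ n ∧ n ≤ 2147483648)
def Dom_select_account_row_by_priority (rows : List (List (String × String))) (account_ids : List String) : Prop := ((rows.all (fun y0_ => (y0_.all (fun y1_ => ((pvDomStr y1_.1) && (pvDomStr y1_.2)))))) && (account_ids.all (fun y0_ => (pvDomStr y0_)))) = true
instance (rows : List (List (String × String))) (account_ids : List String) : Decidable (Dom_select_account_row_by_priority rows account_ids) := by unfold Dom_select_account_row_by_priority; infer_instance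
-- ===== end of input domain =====

-- B replaces A's priority-outer/rows-inner nested scan by a one-time priority table plus a single
-- argmin pass over rows (objective: faster); the return value is proved equal.

-- ===== PORT A =====

-- normalize_account_id(value): (value or "").strip().upper()
def pvNorm (s : String) : String := PySem.Str.upper (PySem.Str.strip s)

-- str(row.get("account_id") or "") — values are strings, so `or ""` = default "" on missing/empty
def pvRowId (row : List (String × String)) : String :=
  (PySem.Dict.get? (PySem.Dict.mk row) "account_id").getD ""

-- inner `for row in rows: if row_matches_account_id(row, nid): return row`
def pvAInner (rows : List (List (String × String))) (nid : String) :
    Option (List (String × String)) :=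
  match rows with
  | [] => none
  | r :: rs => if pvNorm (pvRowId r) = pvNorm nid then some r else pvAInner rs nid

-- outer `for priority_index, account_id in enumerate(account_ids, start=1)`
def pvALoop (rows : List (List (String × String))) :
    List String → Int → (Option (List (String × String))) × Option String × Option Int
  | [], _ => (none, none, none)
  | aid :: rest, i =>
    if pvNorm aid = "" then pvALoop rows rest (i + 1)
    else
      match pvAInner rows (pvNorm aid) with
      | some row => (some row, some (pvNorm aid), some i)
      | none => pvALoop rows rest (i + 1)

def select_account_row_by_priority (rows : List (List (String × String))) (account_ids : List String) : (Option (List (String × String))) × Option String × Option Int :=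
  pvALoop rows account_ids 1

-- ===== PORT B =====

-- table = {}; for priority, aid in enumerate(account_ids, 1): if nid and nid not in table: table[nid] = priority
def pvBTable : List String → Int → PySem.Dict String Int → PySem.Dict String Int
  | [], _, t => t
  | aid :: rest, i, t =>
    pvBTable rest (i + 1)
      (if pvNorm aid ≠ "" ∧ t.contains (pvNorm aid) = false then t.insert (pvNorm aid) i else t)

-- single argmin pass: update best when priority is strictly smaller (earliest row wins ties)
def pvBScan (t : PySem.Dict String Int) :
    List (List (String × String)) →
      (Option (List (String × String))) × Option String × Option Int →
      (Option (List (String × String))) × Option String × Option Int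
  | [], best => best
  | r :: rs, best =>
    match PySem.Dict.get? t (pvNorm (pvRowId r)) with
    | none => pvBScan t rs best
    | some p =>
      match best.2.2 with
      | none => pvBScan t rs (some r, some (pvNorm (pvRowId r)), some p)
      | some bp =>
        if p < bp then pvBScan t rs (some r, some (pvNorm (pvRowId r)), some p)
        else pvBScan t rs best

def select_account_row_by_priority_alt (rows : List (List (String × String))) (account_ids : List String) : (Option (List (String × String))) × Option String × Option Int :=
  pvBScan (pvBTable account_ids 1 (PySem.Dict.mk [])) rows (none, none, none)

-- ===== PRECONDITION & SPEC =====
def Spec_select_account_row_by_priority (rows : List (List (String × String))) (account_ids : List String) (out : (Option (List (String × String))) × Option String × Option Int) : Prop := out = select_account_row_by_priority_alt rows account_ids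
instance (rows : List (List (String × String))) (account_ids : List String) (out : (Option (List (String × String))) × Option String × Option Int) : Decidable (Spec_select_account_row_by_priority rows account_ids out) := by unfold Spec_select_account_row_by_priority; infer_instance

-- ===== CLAIM (what is proved, stated in full; the proofs are below) =====
def Claim_equal_select_account_row_by_priority : Prop := ∀ (rows : List (List (String × String))) (account_ids : List String), Dom_select_account_row_by_priority rows account_ids → Spec_select_account_row_by_priority rows account_ids (select_account_row_by_priority rows account_ids)

-- ===== LEMMAS AND PROOFS =====

-- ---- normalization (strip then upper) is idempotent ----

theorem pv_toNat_of_islower (c : Char) (h : PySem.Chars.islower c = true) :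
    97 ≤ c.toNat ∧ c.toNat ≤ 122 := by
  simp only [PySem.Chars.islower, Char.le_def, Bool.and_eq_true, decide_eq_true_eq,
    UInt32.le_iff_toNat_le] at h
  exact h

theorem pv_isspace_false (c : Char) (h1 : 65 ≤ c.toNat) (h2 : c.toNat ≤ 122) :
    PySem.Chars.isspace c = false := by
  unfold PySem.Chars.isspace
  simp only [Bool.or_eq_false_iff, Bool.and_eq_false_iff, decide_eq_false_iff_not]
  omega

theorem pv_toNat_upperChar (c : Char) (h : PySem.Chars.islower c = true) :
    (PySem.Chars.upperChar c).toNat = c.toNat - 32 := by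
  have hb := pv_toNat_of_islower c h
  unfold PySem.Chars.upperChar
  rw [if_pos h, Char.toNat_ofNat, if_pos]
  unfold Nat.isValidChar
  left; omega

theorem pv_isspace_upperChar (c : Char) :
    PySem.Chars.isspace (PySem.Chars.upperChar c) = PySem.Chars.isspace c := by
  by_cases h : PySem.Chars.islower c = true
  · have hb := pv_toNat_of_islower c h
    rw [pv_isspace_false _ (by rw [pv_toNat_upperChar c h]; omega)
        (by rw [pv_toNat_upperChar c h]; omega),
      pv_isspace_false c (by omega) (by omega)]
  · unfold PySem.Chars.upperChar
    rw [if_neg h]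

theorem pv_upperChar_idem (c : Char) :
    PySem.Chars.upperChar (PySem.Chars.upperChar c) = PySem.Chars.upperChar c := by
  by_cases h : PySem.Chars.islower c = true
  · have hb := pv_toNat_of_islower c h
    have h1 : PySem.Chars.upperChar c = Char.ofNat (c.toNat - 32) := by
      unfold PySem.Chars.upperChar; rw [if_pos h]
    have ht : (Char.ofNat (c.toNat - 32)).toNat = c.toNat - 32 := by
      rw [Char.toNat_ofNat, if_pos]; unfold Nat.isValidChar; left; omega
    have hl : PySem.Chars.islower (Char.ofNat (c.toNat - 32)) = false := by
      simp only [PySem.Chars.islower, Char.le_def, UInt32.le_iff_toNat_le,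
        Bool.and_eq_false_iff, decide_eq_false_iff_not]
      left
      intro hle
      have h97 : 97 ≤ (Char.ofNat (c.toNat - 32)).toNat := hle
      rw [ht] at h97; omega
    rw [h1]
    unfold PySem.Chars.upperChar
    rw [if_neg (by simp [hl])]
  · have h1 : PySem.Chars.upperChar c = c := by unfold PySem.Chars.upperChar; rw [if_neg h]
    rw [h1, h1]

theorem pv_dropWhile_idem {α : Type} (p : α → Bool) (l : List α) :
    List.dropWhile p (List.dropWhile p l) = List.dropWhile p l := by
  induction l with
  | nil => rfl
  | cons a l ih =>
    by_cases h : p a = true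
    · rw [List.dropWhile_cons_of_pos h, ih]
    · rw [List.dropWhile_cons_of_neg (by simp [h]),
        List.dropWhile_cons_of_neg (by simp [h])]

theorem pv_upper_strip_comm (l : List Char) :
    PySem.Chars.strip (PySem.Chars.upper l) = PySem.Chars.upper (PySem.Chars.strip l) := by
  unfold PySem.Chars.strip PySem.Chars.lstrip PySem.Chars.rstrip PySem.Chars.upper
  have hc : (PySem.Chars.isspace ∘ PySem.Chars.upperChar) = PySem.Chars.isspace := by
    funext c; exact pv_isspace_upperChar c
  rw [List.dropWhile_map, hc, ← List.map_reverse, List.dropWhile_map, hc, ← List.map_reverse]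

theorem pv_upper_idem (l : List Char) :
    PySem.Chars.upper (PySem.Chars.upper l) = PySem.Chars.upper l := by
  unfold PySem.Chars.upper
  rw [List.map_map]
  exact List.map_congr_left (fun c _ => pv_upperChar_idem c)

theorem pv_head_not_space (p : Char → Bool) (a : Char) (ms : List Char)
    (h : List.dropWhile p (a :: ms) = a :: ms) : p a = false := by
  by_cases hp : p a = true
  · rw [List.dropWhile_cons_of_pos hp] at h
    have h1 := congrArg List.length h
    have h2 := List.length_dropWhile_le p ms
    simp only [List.length_cons] at h1
    omega
  · simpa using hp

theorem pv_lstrip_rstrip (m : List Char)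
    (h : PySem.Chars.lstrip m = m) :
    PySem.Chars.lstrip (PySem.Chars.rstrip m) = PySem.Chars.rstrip m := by
  unfold PySem.Chars.lstrip PySem.Chars.rstrip at *
  match m with
  | [] => rfl
  | a :: ms =>
    have ha : PySem.Chars.isspace a = false := pv_head_not_space _ a ms h
    rw [List.reverse_cons, List.dropWhile_append]
    by_cases he : (List.dropWhile PySem.Chars.isspace ms.reverse).isEmpty = true
    · rw [if_pos he]
      simp [List.dropWhile_cons_of_neg, ha]
    · rw [if_neg he, List.reverse_append, List.reverse_cons, List.reverse_nil, List.nil_append,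
        List.singleton_append, List.dropWhile_cons_of_neg (by simp [ha])]

theorem pv_strip_idem (l : List Char) :
    PySem.Chars.strip (PySem.Chars.strip l) = PySem.Chars.strip l := by
  unfold PySem.Chars.strip
  have hm : PySem.Chars.lstrip (PySem.Chars.lstrip l) = PySem.Chars.lstrip l := by
    unfold PySem.Chars.lstrip; exact pv_dropWhile_idem _ _
  rw [pv_lstrip_rstrip (PySem.Chars.lstrip l) hm]
  unfold PySem.Chars.rstrip
  rw [List.reverse_reverse, pv_dropWhile_idem]

theorem pv_norm_idem (s : String) : pvNorm (pvNorm s) = pvNorm s := by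
  unfold pvNorm
  apply String.toList_injective
  rw [PySem.Str.toList_upper, PySem.Str.toList_strip, PySem.Str.toList_upper,
    PySem.Str.toList_strip, pv_upper_strip_comm, pv_upper_idem, pv_strip_idem]

-- ---- every row matches its own normalized id ----

theorem pv_aInner_none (rows : List (List (String × String))) (nid : String)
    (h : pvAInner rows nid = none) :
    ∀ r ∈ rows, pvNorm (pvRowId r) ≠ pvNorm nid := by
  induction rows with
  | nil => simp
  | cons r rs ih =>
    unfold pvAInner at h
    by_cases hr : pvNorm (pvRowId r) = pvNorm nid
    · rw [if_pos hr] at h; exact absurd h (by simp)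
    · rw [if_neg hr] at h
      intro r' hr'
      rcases List.mem_cons.mp hr' with hr' | hr'
      · rw [hr']; exact hr
      · exact ih h r' hr'

theorem pv_self_match (rows : List (List (String × String))) (r : List (String × String))
    (hr : r ∈ rows) (h : pvAInner rows (pvNorm (pvRowId r)) = none) : False := by
  have := pv_aInner_none rows _ h r hr
  exact this (pv_norm_idem (pvRowId r)).symm

-- ---- the argmin scan ----

theorem pv_scan_after (t : PySem.Dict String Int)
    (rs : List (List (String × String))) (row : List (String × String)) (nid : String) (i : Int)
    (h : ∀ r ∈ rs, ∀ p, PySem.Dict.get? t (pvNorm (pvRowId r)) = some p → i ≤ p) :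
    pvBScan t rs (some row, some nid, some i) = (some row, some nid, some i) := by
  induction rs with
  | nil => rfl
  | cons r rs ih =>
    unfold pvBScan
    cases hg : PySem.Dict.get? t (pvNorm (pvRowId r)) with
    | none => exact ih (fun r' hr' => h r' (by simp [hr']))
    | some p =>
      have hp := h r (by simp) p hg
      dsimp only
      rw [if_neg (by omega : ¬ p < i)]
      exact ih (fun r' hr' => h r' (by simp [hr']))

theorem pv_scan (t : PySem.Dict String Int) (nid : String) (i : Int)
    (row : List (String × String)) :
    ∀ (rs : List (List (String × String)))
      (st : (Option (List (String × String))) × Option String × Option Int),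
      pvNorm nid = nid →
      PySem.Dict.get? t nid = some i →
      pvAInner rs nid = some row →
      (∀ r ∈ rs, pvNorm (pvRowId r) ≠ nid → ∀ p, PySem.Dict.get? t (pvNorm (pvRowId r)) = some p → i < p) →
      (st.2.2 = none ∨ ∃ br bk bp, st = (some br, some bk, some bp) ∧ i < bp) →
      pvBScan t rs st = (some row, some nid, some i) := by
    intro rs
    induction rs with
    | nil => intro st hn ht hin h hst; exact absurd hin (by simp [pvAInner])
    | cons r rs ih =>
      intro st hn ht hin h hst
      unfold pvAInner at hin
      by_cases hk : pvNorm (pvRowId r) = pvNorm nid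
      · rw [if_pos hk] at hin
        have hrow : r = row := by injection hin
        subst hrow
        rw [hn] at hk
        unfold pvBScan
        rw [hk, ht]
        dsimp only
        have hafter : ∀ r' ∈ rs, ∀ p, PySem.Dict.get? t (pvNorm (pvRowId r')) = some p → i ≤ p := by
          intro r' hr' p hp
          by_cases hk' : pvNorm (pvRowId r') = nid
          · rw [hk', ht] at hp
            injection hp with hv
            omega
          · have := h r' (by simp [hr']) hk' p hp; omega
        rcases hst with hst | ⟨br, bk, bp, hst, hbp⟩
        · obtain ⟨a, b, c⟩ := st
          have hc : c = none := hst
          subst hc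
          exact pv_scan_after t rs r nid i hafter
        · subst hst
          dsimp only
          rw [if_pos hbp]
          exact pv_scan_after t rs r nid i hafter
      · rw [if_neg hk] at hin
        rw [hn] at hk
        have hrest : ∀ r' ∈ rs, pvNorm (pvRowId r') ≠ nid →
            ∀ p, PySem.Dict.get? t (pvNorm (pvRowId r')) = some p → i < p :=
          fun r' hr' => h r' (by simp [hr'])
        unfold pvBScan
        cases hg : PySem.Dict.get? t (pvNorm (pvRowId r)) with
        | none => exact ih st hn ht hin hrest hst
        | some p =>
          have hip : i < p := h r (by simp) hk p hg
          rcases hst with hst | ⟨br, bk, bp, hst, hbp⟩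
          · obtain ⟨a, b, c⟩ := st
            have hc : c = none := hst
            subst hc
            exact ih _ hn ht hin hrest (Or.inr ⟨r, _, p, rfl, hip⟩)
          · subst hst
            dsimp only
            by_cases hpb : p < bp
            · rw [if_pos hpb]
              exact ih _ hn ht hin hrest (Or.inr ⟨r, _, p, rfl, hip⟩)
            · rw [if_neg hpb]
              exact ih _ hn ht hin hrest (Or.inr ⟨br, bk, bp, rfl, hbp⟩)

theorem pv_scan_nomatch (t : PySem.Dict String Int) :
    ∀ (rs : List (List (String × String)))
      (st : (Option (List (String × String))) × Option String × Option Int),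
      (∀ r ∈ rs, PySem.Dict.get? t (pvNorm (pvRowId r)) = none) →
      pvBScan t rs st = st := by
  intro rs
  induction rs with
  | nil => intro st _; rfl
  | cons r rs ih =>
    intro st h
    unfold pvBScan
    rw [h r (by simp)]
    exact ih st (fun r' hr' => h r' (by simp [hr']))

-- ---- building the rest of the table preserves a found winner ----

theorem pv_win (rows : List (List (String × String))) (nid : String) (i : Int)
    (row : List (String × String)) :
    ∀ (ids : List String) (j : Int) (t : PySem.Dict String Int),
      i < j →
      PySem.Dict.get? t nid = some i →
      pvNorm nid = nid →
      pvAInner rows nid = some row →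
      (∀ r ∈ rows, pvNorm (pvRowId r) ≠ nid → ∀ p, PySem.Dict.get? t (pvNorm (pvRowId r)) = some p → i < p) →
      pvBScan (pvBTable ids j t) rows (none, none, none) = (some row, some nid, some i) := by
  intro ids
  induction ids with
  | nil =>
    intro j t hij ht hn hin h
    exact pv_scan t nid i row rows (none, none, none) hn ht hin h (Or.inl rfl)
  | cons aid rest ih =>
    intro j t hij ht hn hin h
    unfold pvBTable
    by_cases hc : pvNorm aid ≠ "" ∧ t.contains (pvNorm aid) = false
    · rw [if_pos hc]
      have hne : nid ≠ pvNorm aid := by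
        intro he
        rw [← he] at hc
        rw [PySem.Dict.contains_eq_isSome_get?, ht] at hc
        exact absurd hc.2 (by simp)
      refine ih (j + 1) _ (by omega) ?_ hn hin ?_
      · rw [PySem.Dict.get?_insert_of_ne _ _ hne, ht]
      · intro r hr hk p hp
        by_cases hkey : pvNorm (pvRowId r) = pvNorm aid
        · rw [hkey, PySem.Dict.get?_insert_self] at hp
          injection hp with hv
          omega
        · rw [PySem.Dict.get?_insert_of_ne _ _ hkey] at hp
          exact h r hr hk p hp
    · rw [if_neg hc]
      exact ih (j + 1) t (by omega) ht hn hin h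

-- ---- the main induction over account_ids ----

theorem pv_main (rows : List (List (String × String))) :
    ∀ (ids : List String) (i : Int) (t : PySem.Dict String Int),
      (∀ k p, PySem.Dict.get? t k = some p → pvAInner rows k = none) →
      pvBScan (pvBTable ids i t) rows (none, none, none) = pvALoop rows ids i := by
  intro ids
  induction ids with
  | nil =>
    intro i t H
    unfold pvBTable pvALoop
    apply pv_scan_nomatch
    intro r hr
    cases hg : PySem.Dict.get? t (pvNorm (pvRowId r)) with
    | none => rfl
    | some p => exact absurd hg (fun hg => pv_self_match rows r hr (H _ p hg))
  | cons aid rest ih =>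
    intro i t H
    unfold pvBTable pvALoop
    by_cases h0 : pvNorm aid = ""
    · rw [if_pos h0, if_neg (by simp [h0])]
      exact ih (i + 1) t H
    · rw [if_neg h0]
      by_cases hct : t.contains (pvNorm aid) = true
      · rw [if_neg (by simp [hct])]
        rw [PySem.Dict.contains_eq_isSome_get?] at hct
        cases hg : PySem.Dict.get? t (pvNorm aid) with
        | none => rw [hg] at hct; exact absurd hct (by simp)
        | some p =>
          rw [H _ p hg]
          exact ih (i + 1) t H
      · rw [if_pos ⟨h0, by simpa using hct⟩]
        cases hin : pvAInner rows (pvNorm aid) with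
        | none =>
          refine ih (i + 1) _ ?_
          intro k p hk
          by_cases hke : k = pvNorm aid
          · rw [hke]; exact hin
          · rw [PySem.Dict.get?_insert_of_ne _ _ hke] at hk
            exact H k p hk
        | some row =>
          refine pv_win rows (pvNorm aid) i row rest (i + 1) _ (by omega)
            (PySem.Dict.get?_insert_self _ _ _) (pv_norm_idem aid) hin ?_
          intro r hr hk p hp
          rw [PySem.Dict.get?_insert_of_ne _ _ hk] at hp
          exact absurd (H _ p hp) (fun hn => pv_self_match rows r hr hn)

-- ===== VERDICT (by name: the statement is the Claim_ definition above) =====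
theorem select_account_row_by_priority_spec : Claim_equal_select_account_row_by_priority := by
  intro rows account_ids _
  unfold Spec_select_account_row_by_priority select_account_row_by_priority select_account_row_by_priority_alt
  exact (pv_main rows account_ids 1 (PySem.Dict.mk []) (by intro k p h; simp [PySem.Dict.get?] at h)).symm
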